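-- pv_equiv track=rewrite | github.com/cry999/atcoder-daily-training | abc/424/d_bit_dp.py | bit_to_s
-- ===== SOURCE A (Python) =====
-- def bit_to_s(n: int, digit: int) -> str:
--     s = ['.'] * digit
--     while digit:
--         if n & 1:
--             s[digit-1] = '#'
--         digit -= 1
--         n >>= 1
--     return ''.join(s)
-- ===== SOURCE B (Python) =====
-- def bit_to_s(n: int, digit: int) -> str:
--     if digit <= 0:
--         return ''
--     if digit == 1:
--         return '#' if n & 1 else '.'
--     h = digit // 2
--     return bit_to_s(n >> h, digit - h) + bit_to_s(n, h)
-- ===== Notes on version B (the rewrite author's own statement) =====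
-- stated objective: alternative
-- what changed: Replaces A's destructive shifting while-loop over a preallocated '.'-list by a recursive divide-and-conquer: the field is split at h = digit//2 into a high half (bits shifted down by h) and a low half, each rendered recursively and concatenated.
import Mathlib
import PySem

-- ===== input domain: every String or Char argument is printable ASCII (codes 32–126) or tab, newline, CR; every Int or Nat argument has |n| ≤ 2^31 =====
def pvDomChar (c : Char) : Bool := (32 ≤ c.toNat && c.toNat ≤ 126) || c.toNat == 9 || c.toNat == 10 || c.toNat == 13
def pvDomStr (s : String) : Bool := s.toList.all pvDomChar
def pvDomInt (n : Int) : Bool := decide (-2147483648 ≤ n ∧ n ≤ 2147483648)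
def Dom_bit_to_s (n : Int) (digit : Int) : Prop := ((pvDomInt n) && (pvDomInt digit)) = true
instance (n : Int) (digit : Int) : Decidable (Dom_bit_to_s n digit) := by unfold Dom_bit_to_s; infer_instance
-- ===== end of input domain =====

-- B replaces A's destructive shifting while-loop over a preallocated '.'-list by a
-- recursive divide-and-conquer that splits the bit field at digit//2 and concatenates
-- the two recursively rendered halves (alternative decomposition, same cost class).

-- ===== PORT A =====
-- the while loop, with the (nonnegative, by Pre_) counter `digit` as structural fuel;
-- each step optionally writes '#' at index digit-1 and continues with digit-1, n>>1
def pvLoopA (n : Int) (digit : Nat) (s : List Char) : List Char :=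
  match digit with
  | 0 => s
  | d + 1 => pvLoopA (n >>> (1 : Nat)) d (if PySem.Int.band n 1 ≠ 0 then s.set d '#' else s)

def bit_to_s (n : Int) (digit : Int) : String :=
  String.ofList (pvLoopA n digit.toNat (List.replicate digit.toNat '.'))

-- ===== PORT B =====
-- Source B's recursion on the width: `digit <= 0 -> ''` is the fuel-0 case of `digit.toNat`;
-- `h = digit // 2` on a positive Int equals Nat division on the fuel.
def pvRecB (n : Int) (d : Nat) : List Char :=
  if d = 0 then []
  else if d = 1 then [if PySem.Int.band n 1 ≠ 0 then '#' else '.']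
  else
    let h := d / 2
    pvRecB (n >>> h) (d - h) ++ pvRecB n h
termination_by d
decreasing_by all_goals omega

def bit_to_s_alt (n : Int) (digit : Int) : String :=
  String.ofList (pvRecB n digit.toNat)

-- ===== PRECONDITION & SPEC =====
-- Pre_ excludes digit < 0: there A's `while digit:` counter never reaches 0, so A
-- diverges (or hits IndexError on the empty list) and returns no value.
def Pre_bit_to_s (n : Int) (digit : Int) : Prop := 0 ≤ digit
instance (n : Int) (digit : Int) : Decidable (Pre_bit_to_s n digit) := by unfold Pre_bit_to_s; infer_instance
def pvWitness_bit_to_s : Int × Int := (5, 3)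

def Spec_bit_to_s (n : Int) (digit : Int) (out : String) : Prop := out = bit_to_s_alt n digit
instance (n : Int) (digit : Int) (out : String) : Decidable (Spec_bit_to_s n digit out) := by unfold Spec_bit_to_s; infer_instance

-- ===== CLAIM (what is proved, stated in full; the proofs are below) =====
def Claim_equal_bit_to_s : Prop := ∀ (n : Int) (digit : Int), Dom_bit_to_s n digit → Pre_bit_to_s n digit → Spec_bit_to_s n digit (bit_to_s n digit)

-- ===== LEMMAS AND PROOFS =====

-- A's loop only touches indices < digit, so a suffix rides along untouched
lemma pvLoopA_append (d : Nat) (n : Int) (t u : List Char) (h : d ≤ t.length) :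
    pvLoopA n d (t ++ u) = pvLoopA n d t ++ u := by
  induction d generalizing n t with
  | zero => simp [pvLoopA]
  | succ d ih =>
    simp only [pvLoopA]
    split
    · rw [List.set_append_left _ _ (by omega), ih _ _ (by simp; omega)]
    · exact ih _ _ (by omega)

-- the characteristic shape of A's loop result on the fresh '.'-list: high bits first
def pvBits (n : Int) (d : Nat) : List Char :=
  match d with
  | 0 => []
  | d + 1 => pvBits (n >>> (1 : Nat)) d ++ [if PySem.Int.band n 1 ≠ 0 then '#' else '.']

lemma pvLoopA_replicate (d : Nat) (n : Int) :
    pvLoopA n d (List.replicate d '.') = pvBits n d := by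
  induction d generalizing n with
  | zero => simp [pvLoopA, pvBits]
  | succ d ih =>
    have hrep : List.replicate (d + 1) '.' = List.replicate d '.' ++ ['.'] := by
      simp [List.replicate_succ']
    simp only [pvLoopA, pvBits, hrep]
    split
    · rw [List.set_append_right _ _ (by simp)]
      simp only [List.length_replicate, Nat.sub_self, List.set_cons_zero]
      rw [pvLoopA_append _ _ _ _ (by simp), ih]
    · rw [pvLoopA_append _ _ _ _ (by simp), ih]

-- splitting a bit field: the top `a` bits of a width-(a+b) field are the width-a field of n >> b
lemma pvBits_add (a b : Nat) (n : Int) :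
    pvBits n (a + b) = pvBits (n >>> b) a ++ pvBits n b := by
  induction b generalizing n with
  | zero =>
    simp [pvBits, Int.shiftRight_zero]
  | succ b ih =>
    have h1 : a + (b + 1) = (a + b) + 1 := by omega
    rw [h1]
    simp only [pvBits]
    rw [ih]
    have h2 : (n >>> (1 : Nat)) >>> b = n >>> (b + 1) := by
      rw [show b + 1 = 1 + b from by omega]
      exact (Int.shiftRight_add n 1 b).symm
    rw [h2, List.append_assoc]

lemma pvRecB_eq_pvBits (d : Nat) (n : Int) : pvRecB n d = pvBits n d := by
  induction d using Nat.strong_induction_on generalizing n with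
  | _ d ih =>
    match d with
    | 0 => simp [pvRecB, pvBits]
    | 1 => simp [pvRecB, pvBits]
    | (k + 2) =>
      rw [pvRecB]
      simp only [show ¬(k + 2 = 0) from by omega, show ¬(k + 2 = 1) from by omega,
        if_false]
      rw [ih _ (by omega), ih _ (by omega),
        ← pvBits_add ((k + 2) - (k + 2) / 2) ((k + 2) / 2) n,
        show ((k + 2) - (k + 2) / 2) + (k + 2) / 2 = k + 2 from by omega]

-- ===== VERDICT (by name: the statement is the Claim_ definition above) =====
theorem bit_to_s_spec : Claim_equal_bit_to_s := by
  intro n digit _ _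
  show bit_to_s n digit = bit_to_s_alt n digit
  unfold bit_to_s bit_to_s_alt
  rw [pvLoopA_replicate, pvRecB_eq_pvBits]
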